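-- pv_equiv track=rewrite | github.com/emmanuelgkn/projet_MOGPL | resolution_instance.py | peut_bouger
-- ===== SOURCE A (Python) =====
-- DEPLA = {
--     "nord": (-1,0),
--     "sud": (1,0),
--     "est": (0,1),
--     "ouest":(0,-1),
-- }
--
-- def peut_bouger(i,j,o,n,N,M,valide):
--     di,dj = DEPLA[o]
--     i_act = i
--     j_act = j
--
--     for _ in range(n):
--         i2 = i_act + di
--         j2 = j_act + dj
--
--         if not ((0 <= i2 <= N) and (0 <= j2 <= M)):
--             return False, None
--
--         if not valide[i2][j2]:
--             return False, None
--
--         i_act, j_act = i2, j2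
--
--     return True, (i_act, j_act)
-- ===== SOURCE B (Python) =====
-- DEPLA = {
--     "nord": (-1,0),
--     "sud": (1,0),
--     "est": (0,1),
--     "ouest":(0,-1),
-- }
--
-- def peut_bouger(i, j, o, n, N, M, valide):
--     di, dj = DEPLA[o]
--     if n <= 0:
--         return True, (i, j)
--     ti, tj = i + di * n, j + dj * n
--     # The path is a straight segment: in bounds at step 1 and at step n
--     # implies in bounds at every step in between, so test only the two ends.
--     if not (0 <= i + di <= N and 0 <= j + dj <= M and 0 <= ti <= N and 0 <= tj <= M):
--         return False, None
--     # Extract the traversed cells as one slice (of the row, or of the extracted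
--     # column) and test them with all() instead of stepping a running position.
--     if di == 0:
--         cells = valide[i][min(j + dj, tj): max(j + dj, tj) + 1]
--     else:
--         cells = [row[j] for row in valide][min(i + di, ti): max(i + di, ti) + 1]
--     if all(cells):
--         return True, (ti, tj)
--     return False, None
-- ===== Notes on version B (the rewrite author's own statement) =====
-- stated objective: alternative
-- what changed: B has no stepping loop at all: it computes the endpoint in closed form, checks bounds only at the two ends of the straight segment (valid by convexity), and tests validity by slicing the traversed row (or the extracted column) out of the grid and applying all() to the slice.
-- outside the precondition, e.g. on peut_bouger(0, 0, 'sud', 1, 5, 5, [[True], [True], []]): A returns (True, (1, 0)), B raises IndexError; on peut_bouger(0, 0, 'est', 2, 5, 5, [[True, True, True]]): A returns (True, (0, 2)), B returns (True, (0, 2))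
import Mathlib
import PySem

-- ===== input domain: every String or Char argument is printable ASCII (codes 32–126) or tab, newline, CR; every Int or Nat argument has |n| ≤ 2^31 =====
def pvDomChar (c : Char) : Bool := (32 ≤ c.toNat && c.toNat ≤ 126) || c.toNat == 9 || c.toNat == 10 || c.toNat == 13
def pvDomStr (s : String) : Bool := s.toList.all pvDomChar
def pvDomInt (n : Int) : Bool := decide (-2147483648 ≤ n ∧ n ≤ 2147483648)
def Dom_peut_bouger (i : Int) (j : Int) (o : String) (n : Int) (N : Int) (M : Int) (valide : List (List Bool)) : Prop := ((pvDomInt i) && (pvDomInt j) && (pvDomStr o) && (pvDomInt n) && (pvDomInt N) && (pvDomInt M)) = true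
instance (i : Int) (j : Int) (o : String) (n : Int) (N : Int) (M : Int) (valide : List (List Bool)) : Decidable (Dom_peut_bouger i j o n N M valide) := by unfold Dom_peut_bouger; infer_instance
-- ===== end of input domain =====

-- B drops the stepping loop entirely: endpoint in closed form, bounds tested only at the
-- two ends of the straight segment, and validity tested by slicing the traversed row (or
-- the extracted column) and applying all(); objective: alternative decomposition.

-- ===== PORT A =====
def pvDEPLA : PySem.Dict String (Int × Int) :=
  PySem.Dict.ofList [("nord", (-1, 0)), ("sud", (1, 0)), ("est", (0, 1)), ("ouest", (0, -1))]

-- valide[r][c]; exact whenever 0 ≤ r < len valide and 0 ≤ c < len (valide[r]) — guaranteed by Pre_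
def pvCell (valide : List (List Bool)) (r c : Int) : Bool :=
  PySem.List.pyGetD (PySem.List.pyGetD valide r []) c false

-- the 'for _ in range(n)' loop of A, with the running position (i_act, j_act) as state
def pvLoopA (di dj N M : Int) (valide : List (List Bool)) : Nat → Int → Int → Bool × Option (Int × Int)
  | 0, ia, ja => (true, some (ia, ja))
  | m + 1, ia, ja =>
    if ¬ (0 ≤ ia + di ∧ ia + di ≤ N ∧ 0 ≤ ja + dj ∧ ja + dj ≤ M) then (false, none)
    else if ¬ (pvCell valide (ia + di) (ja + dj) = true) then (false, none)
    else pvLoopA di dj N M valide m (ia + di) (ja + dj)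

def peut_bouger (i : Int) (j : Int) (o : String) (n : Int) (N : Int) (M : Int) (valide : List (List Bool)) : Bool × (Option (Int × Int)) :=
  let d := (pvDEPLA.get? o).getD (0, 0)
  pvLoopA d.1 d.2 N M valide n.toNat i j

-- ===== PORT B =====
def peut_bouger_alt (i : Int) (j : Int) (o : String) (n : Int) (N : Int) (M : Int) (valide : List (List Bool)) : Bool × (Option (Int × Int)) :=
  let d := (pvDEPLA.get? o).getD (0, 0)
  if n ≤ 0 then (true, some (i, j))
  else
    let ti := i + d.1 * n
    let tj := j + d.2 * n
    if ¬ (0 ≤ i + d.1 ∧ i + d.1 ≤ N ∧ 0 ≤ j + d.2 ∧ j + d.2 ≤ M ∧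
          0 ≤ ti ∧ ti ≤ N ∧ 0 ≤ tj ∧ tj ≤ M) then (false, none)
    else
      -- row[j] in the column comprehension is ported exactly via pyGetD (Pre_ keeps it in range)
      let cells :=
        if d.1 = 0 then
          PySem.List.slice (PySem.List.pyGetD valide i [])
            (some (min (j + d.2) tj)) (some (max (j + d.2) tj + 1))
        else
          PySem.List.slice (valide.map (fun row => PySem.List.pyGetD row j false))
            (some (min (i + d.1) ti)) (some (max (i + d.1) ti + 1))
      if cells.all id then (true, some (ti, tj)) else (false, none)

-- ===== PRECONDITION & SPEC =====
def pvDelta (o : String) : Int × Int :=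
  if o = "nord" then (-1, 0) else if o = "sud" then (1, 0)
  else if o = "est" then (0, 1) else (0, -1)

-- Pre_ excludes unknown directions (KeyError in A) and, when n ≥ 1 and the first step is
-- in bounds, grids smaller than (N+1)×(M+1), on which the walk can raise IndexError; on
-- some of those small grids A still returns normally, while B's column extraction reads
-- every row and may raise there.
def Pre_peut_bouger (i : Int) (j : Int) (o : String) (n : Int) (N : Int) (M : Int) (valide : List (List Bool)) : Prop :=
  (o = "nord" ∨ o = "sud" ∨ o = "est" ∨ o = "ouest") ∧
  (n ≤ 0 ∨
   ¬ (0 ≤ i + (pvDelta o).1 ∧ i + (pvDelta o).1 ≤ N ∧ 0 ≤ j + (pvDelta o).2 ∧ j + (pvDelta o).2 ≤ M) ∨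
   (N + 1 ≤ (valide.length : Int) ∧ ∀ row ∈ valide, M + 1 ≤ (row.length : Int)))

instance (i : Int) (j : Int) (o : String) (n : Int) (N : Int) (M : Int) (valide : List (List Bool)) : Decidable (Pre_peut_bouger i j o n N M valide) := by unfold Pre_peut_bouger; infer_instance

def pvWitness_peut_bouger : Int × Int × String × Int × Int × Int × List (List Bool) :=
  (0, 0, "est", 2, 1, 3, [[true, true, true, true], [true, true, true, true]])

def Spec_peut_bouger (i : Int) (j : Int) (o : String) (n : Int) (N : Int) (M : Int) (valide : List (List Bool)) (out : Bool × (Option (Int × Int))) : Prop := out = peut_bouger_alt i j o n N M valide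
instance (i : Int) (j : Int) (o : String) (n : Int) (N : Int) (M : Int) (valide : List (List Bool)) (out : Bool × (Option (Int × Int))) : Decidable (Spec_peut_bouger i j o n N M valide out) := by unfold Spec_peut_bouger; infer_instance

-- ===== CLAIM (what is proved, stated in full; the proofs are below) =====
def Claim_equal_peut_bouger : Prop := ∀ (i : Int) (j : Int) (o : String) (n : Int) (N : Int) (M : Int) (valide : List (List Bool)), Dom_peut_bouger i j o n N M valide → Pre_peut_bouger i j o n N M valide → Spec_peut_bouger i j o n N M valide (peut_bouger i j o n N M valide)

-- ===== LEMMAS AND PROOFS =====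

-- all() on a slice of a list of Bools, characterised pointwise
lemma pvAllSlice (L : List Bool) (a b : Int) (ha : 0 ≤ a) (hab : a ≤ b) (hb : b ≤ (L.length : Int)) :
    ((PySem.List.slice L (some a) (some b)).all id = true) ↔
    (∀ t : Int, a ≤ t → t < b → PySem.List.pyGetD L t false = true) := by
  rw [PySem.List.slice_toNat L ha (by omega : (0:Int) ≤ b)]
  constructor
  · intro h t ht1 ht2
    have hlen : ((L.drop a.toNat).take (b.toNat - a.toNat)).length = b.toNat - a.toNat := by
      simp [List.length_take, List.length_drop]; omega
    have h1 : t.toNat - a.toNat < ((L.drop a.toNat).take (b.toNat - a.toNat)).length := by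
      rw [hlen]; omega
    have h2 := List.all_eq_true.mp h _ (List.getElem_mem h1)
    have h3 : ((L.drop a.toNat).take (b.toNat - a.toNat))[t.toNat - a.toNat]'h1 =
        L[t.toNat]'(by omega) := by
      rw [List.getElem_take, List.getElem_drop]
      congr 1; omega
    rw [PySem.List.pyGetD_eq_getElem L false (by omega) (by omega)]
    rw [h3] at h2
    simpa using h2
  · intro h
    rw [List.all_eq_true]
    intro x hx
    obtain ⟨u, hu, hux⟩ := List.mem_iff_getElem.mp hx
    have hlen : ((L.drop a.toNat).take (b.toNat - a.toNat)).length = b.toNat - a.toNat := by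
      simp [List.length_take, List.length_drop]; omega
    have hub : u < b.toNat - a.toNat := by omega
    have h3 : ((L.drop a.toNat).take (b.toNat - a.toNat))[u]'hu = L[a.toNat + u]'(by omega) := by
      rw [List.getElem_take, List.getElem_drop]
    have := h ((a.toNat + u : Nat) : Int) (by omega) (by omega)
    rw [PySem.List.pyGetD_eq_getElem L false (by omega) (by omega)] at this
    simp only [Int.toNat_natCast] at this
    rw [h3, this] at hux
    simp [← hux]

-- if the straight line leaves the bounds at some step ≤ m, A's loop returns (false, none)
lemma pvLoopA_oob (di dj N M : Int) (valide : List (List Bool)) :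
    ∀ (m : Nat) (ia ja : Int),
      (∃ s : Int, 1 ≤ s ∧ s ≤ (m : Int) ∧
        ¬ (0 ≤ ia + di * s ∧ ia + di * s ≤ N ∧ 0 ≤ ja + dj * s ∧ ja + dj * s ≤ M)) →
      pvLoopA di dj N M valide m ia ja = (false, none) := by
  intro m
  induction m with
  | zero => rintro ia ja ⟨s, hs1, hs2, _⟩; exfalso; omega
  | succ m ih =>
    rintro ia ja ⟨s, hs1, hs2, hs3⟩
    simp only [pvLoopA]
    rcases Decidable.em (0 ≤ ia + di ∧ ia + di ≤ N ∧ 0 ≤ ja + dj ∧ ja + dj ≤ M) with h1 | h1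
    · rw [if_neg (not_not_intro h1)]
      rcases Decidable.em (pvCell valide (ia + di) (ja + dj) = true) with h2 | h2
      · rw [if_neg (not_not_intro h2)]
        rcases eq_or_lt_of_le hs1 with h | h
        · exfalso; apply hs3; rw [← h]; simpa using h1
        · apply ih
          refine ⟨s - 1, by omega, by omega, ?_⟩
          have e1 : ia + di + di * (s - 1) = ia + di * s := by ring
          have e2 : ja + dj + dj * (s - 1) = ja + dj * s := by ring
          rw [e1, e2]; exact hs3
      · rw [if_pos h2]
    · rw [if_pos h1]

-- if every step is in bounds and every traversed cell is valid, the loop succeeds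
lemma pvLoopA_ok (di dj N M i j nn : Int) (valide : List (List Bool))
    (hinb : ∀ s : Int, 1 ≤ s → s ≤ nn →
      0 ≤ i + di * s ∧ i + di * s ≤ N ∧ 0 ≤ j + dj * s ∧ j + dj * s ≤ M)
    (hval : ∀ s : Int, 1 ≤ s → s ≤ nn → pvCell valide (i + di * s) (j + dj * s) = true) :
    ∀ (m : Nat) (k : Int), 0 ≤ k → k + (m : Int) = nn →
      pvLoopA di dj N M valide m (i + di * k) (j + dj * k) =
      (true, some (i + di * nn, j + dj * nn)) := by
  intro m
  induction m with
  | zero =>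
    intro k hk0 hk
    have : k = nn := by omega
    subst this; simp [pvLoopA]
  | succ m ih =>
    intro k hk0 hk
    have hk1 : k + 1 ≤ nn := by omega
    have e1 : i + di * k + di = i + di * (k + 1) := by ring
    have e2 : j + dj * k + dj = j + dj * (k + 1) := by ring
    simp only [pvLoopA, e1, e2]
    rw [if_neg (not_not_intro (hinb (k + 1) (by omega) hk1)),
        if_neg (not_not_intro (hval (k + 1) (by omega) hk1))]
    exact ih (k + 1) (by omega) (by omega)

-- if every step is in bounds but some traversed cell is invalid, the loop fails
lemma pvLoopA_bad (di dj N M i j nn : Int) (valide : List (List Bool))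
    (hinb : ∀ s : Int, 1 ≤ s → s ≤ nn →
      0 ≤ i + di * s ∧ i + di * s ≤ N ∧ 0 ≤ j + dj * s ∧ j + dj * s ≤ M) :
    ∀ (m : Nat) (k : Int), 0 ≤ k → k + (m : Int) = nn →
      (∃ s : Int, k + 1 ≤ s ∧ s ≤ nn ∧ ¬ pvCell valide (i + di * s) (j + dj * s) = true) →
      pvLoopA di dj N M valide m (i + di * k) (j + dj * k) = (false, none) := by
  intro m
  induction m with
  | zero => rintro k hk0 hk ⟨s, hs1, hs2, _⟩; exfalso; omega
  | succ m ih =>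
    rintro k hk0 hk ⟨s, hs1, hs2, hs3⟩
    have hk1 : k + 1 ≤ nn := by omega
    have e1 : i + di * k + di = i + di * (k + 1) := by ring
    have e2 : j + dj * k + dj = j + dj * (k + 1) := by ring
    simp only [pvLoopA, e1, e2]
    rw [if_neg (not_not_intro (hinb (k + 1) (by omega) hk1))]
    rcases Decidable.em (pvCell valide (i + di * (k + 1)) (j + dj * (k + 1)) = true) with h2 | h2
    · rw [if_neg (not_not_intro h2)]
      apply ih (k + 1) (by omega) (by omega)
      refine ⟨s, ?_, hs2, hs3⟩
      rcases eq_or_lt_of_le hs1 with h | h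
      · exfalso; apply hs3; rw [← h]; exact h2
      · omega
    · rw [if_pos h2]

-- column extraction: the mapped list reads the same cells
lemma pvColCell (valide : List (List Bool)) (j t : Int) (ht0 : 0 ≤ t) (ht : t < (valide.length : Int)) :
    PySem.List.pyGetD (valide.map (fun row => PySem.List.pyGetD row j false)) t false =
    pvCell valide t j := by
  rw [PySem.List.pyGetD_eq_getElem _ false ht0 (by simpa using ht)]
  rw [List.getElem_map]
  unfold pvCell
  rw [PySem.List.pyGetD_eq_getElem valide [] ht0 ht]

-- the sliced row reads the same cells as the walk (horizontal moves)
lemma pvRowAll (dj i j n : Int) (hdj : dj = -1 ∨ dj = 1) (hn : 1 ≤ n) (valide : List (List Bool))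
    (hbL : 0 ≤ min (j + dj) (j + dj * n))
    (hbU : max (j + dj) (j + dj * n) + 1 ≤ ((PySem.List.pyGetD valide i []).length : Int)) :
    ((PySem.List.slice (PySem.List.pyGetD valide i [])
        (some (min (j + dj) (j + dj * n))) (some (max (j + dj) (j + dj * n) + 1))).all id = true) ↔
    (∀ s : Int, 1 ≤ s → s ≤ n → pvCell valide i (j + dj * s) = true) := by
  rw [pvAllSlice _ _ _ hbL (by omega) hbU]
  unfold pvCell
  rcases hdj with h | h <;> subst h <;> constructor
  · intro h s hs1 hs2
    exact h (j + -1 * s) (by omega) (by omega)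
  · intro h t ht1 ht2
    have := h (j - t) (by omega) (by omega)
    have e : j + -1 * (j - t) = t := by ring
    rwa [e] at this
  · intro h s hs1 hs2
    exact h (j + 1 * s) (by omega) (by omega)
  · intro h t ht1 ht2
    have := h (t - j) (by omega) (by omega)
    have e : j + 1 * (t - j) = t := by ring
    rwa [e] at this

-- the sliced column reads the same cells as the walk (vertical moves)
lemma pvColAll (di i j n : Int) (hdi : di = -1 ∨ di = 1) (hn : 1 ≤ n) (valide : List (List Bool))
    (hbL : 0 ≤ min (i + di) (i + di * n))
    (hbU : max (i + di) (i + di * n) + 1 ≤ (valide.length : Int)) :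
    ((PySem.List.slice (valide.map (fun row => PySem.List.pyGetD row j false))
        (some (min (i + di) (i + di * n))) (some (max (i + di) (i + di * n) + 1))).all id = true) ↔
    (∀ s : Int, 1 ≤ s → s ≤ n → pvCell valide (i + di * s) j = true) := by
  rw [pvAllSlice _ _ _ hbL (by omega) (by simpa using hbU)]
  have hcell : ∀ t : Int, min (i + di) (i + di * n) ≤ t → t < max (i + di) (i + di * n) + 1 →
      PySem.List.pyGetD (valide.map (fun row => PySem.List.pyGetD row j false)) t false =
      pvCell valide t j := by
    intro t h1 h2
    exact pvColCell valide j t (by omega) (by omega)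
  rcases hdi with h | h <;> subst h <;> constructor
  · intro h s hs1 hs2
    rw [← hcell (i + -1 * s) (by omega) (by omega)]
    exact h _ (by omega) (by omega)
  · intro h t ht1 ht2
    have := h (i - t) (by omega) (by omega)
    have e : i + -1 * (i - t) = t := by ring
    rw [e] at this
    rw [hcell t ht1 ht2]; exact this
  · intro h s hs1 hs2
    rw [← hcell (i + 1 * s) (by omega) (by omega)]
    exact h _ (by omega) (by omega)
  · intro h t ht1 ht2
    have := h (t - i) (by omega) (by omega)
    have e : i + 1 * (t - i) = t := by ring
    rw [e] at this
    rw [hcell t ht1 ht2]; exact this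

-- master equivalence, for the four unit direction vectors, under Pre_'s second conjunct
lemma pvMain (di dj : Int)
    (hd : (di = -1 ∧ dj = 0) ∨ (di = 1 ∧ dj = 0) ∨ (di = 0 ∧ dj = 1) ∨ (di = 0 ∧ dj = -1))
    (i j n N M : Int) (valide : List (List Bool))
    (hpre2 : n ≤ 0 ∨ ¬ (0 ≤ i + di ∧ i + di ≤ N ∧ 0 ≤ j + dj ∧ j + dj ≤ M) ∨
      (N + 1 ≤ (valide.length : Int) ∧ ∀ row ∈ valide, M + 1 ≤ (row.length : Int))) :
    pvLoopA di dj N M valide n.toNat i j =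
      (if n ≤ 0 then (true, some (i, j))
       else if ¬ (0 ≤ i + di ∧ i + di ≤ N ∧ 0 ≤ j + dj ∧ j + dj ≤ M ∧
             0 ≤ i + di * n ∧ i + di * n ≤ N ∧ 0 ≤ j + dj * n ∧ j + dj * n ≤ M) then (false, none)
       else if (if di = 0 then
            PySem.List.slice (PySem.List.pyGetD valide i [])
              (some (min (j + dj) (j + dj * n))) (some (max (j + dj) (j + dj * n) + 1))
          else
            PySem.List.slice (valide.map (fun row => PySem.List.pyGetD row j false))
              (some (min (i + di) (i + di * n))) (some (max (i + di) (i + di * n) + 1))).all id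
         then (true, some (i + di * n, j + dj * n)) else (false, none)) := by
  by_cases hn : n ≤ 0
  · have h0 : n.toNat = 0 := by omega
    simp [hn, h0, pvLoopA]
  · push Not at hn
    rw [if_neg (by omega : ¬ n ≤ 0)]
    by_cases hb : (0 ≤ i + di ∧ i + di ≤ N ∧ 0 ≤ j + dj ∧ j + dj ≤ M ∧
          0 ≤ i + di * n ∧ i + di * n ≤ N ∧ 0 ≤ j + dj * n ∧ j + dj * n ≤ M)
    · rw [if_neg (not_not_intro hb)]
      obtain ⟨b1, b2, b3, b4, b5, b6, b7, b8⟩ := hb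
      have hinb : ∀ s : Int, 1 ≤ s → s ≤ n →
          0 ≤ i + di * s ∧ i + di * s ≤ N ∧ 0 ≤ j + dj * s ∧ j + dj * s ≤ M := by
        intro s hs1 hs2
        rcases hd with ⟨h1, h2⟩ | ⟨h1, h2⟩ | ⟨h1, h2⟩ | ⟨h1, h2⟩ <;> subst h1 <;> subst h2 <;>
          simp only [neg_one_mul, one_mul, zero_mul] at * <;> omega
      have hgrid : N + 1 ≤ (valide.length : Int) ∧ ∀ row ∈ valide, M + 1 ≤ (row.length : Int) := by
        rcases hpre2 with h | h | h
        · omega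
        · exact absurd ⟨b1, b2, b3, b4⟩ h
        · exact h
      have hiff : ((if di = 0 then
            PySem.List.slice (PySem.List.pyGetD valide i [])
              (some (min (j + dj) (j + dj * n))) (some (max (j + dj) (j + dj * n) + 1))
          else
            PySem.List.slice (valide.map (fun row => PySem.List.pyGetD row j false))
              (some (min (i + di) (i + di * n))) (some (max (i + di) (i + di * n) + 1))).all id = true) ↔
          (∀ s : Int, 1 ≤ s → s ≤ n → pvCell valide (i + di * s) (j + dj * s) = true) := by
        rcases hd with ⟨h1, h2⟩ | ⟨h1, h2⟩ | ⟨h1, h2⟩ | ⟨h1, h2⟩ <;> subst h1 <;> subst h2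
        · rw [if_neg (by norm_num)]
          rw [pvColAll (-1) i j n (Or.inl rfl) hn valide (by omega) (by omega)]
          simp only [zero_mul, add_zero]
        · rw [if_neg (by norm_num)]
          rw [pvColAll 1 i j n (Or.inr rfl) hn valide (by omega) (by omega)]
          simp only [zero_mul, add_zero]
        · rw [if_pos rfl]
          have hrow : M + 1 ≤ ((PySem.List.pyGetD valide i []).length : Int) := by
            rw [PySem.List.pyGetD_eq_getElem valide [] (by omega) (by omega)]
            exact hgrid.2 _ (valide.getElem_mem _)
          rw [pvRowAll 1 i j n (Or.inr rfl) hn valide (by omega) (by omega)]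
          simp only [zero_mul, add_zero]
        · rw [if_pos rfl]
          have hrow : M + 1 ≤ ((PySem.List.pyGetD valide i []).length : Int) := by
            rw [PySem.List.pyGetD_eq_getElem valide [] (by omega) (by omega)]
            exact hgrid.2 _ (valide.getElem_mem _)
          rw [pvRowAll (-1) i j n (Or.inl rfl) hn valide (by omega) (by omega)]
          simp only [zero_mul, add_zero]
      by_cases hall : ∀ s : Int, 1 ≤ s → s ≤ n →
          pvCell valide (i + di * s) (j + dj * s) = true
      · have hA := pvLoopA_ok di dj N M i j n valide hinb hall n.toNat 0 le_rfl (by omega)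
        simp only [mul_zero, add_zero] at hA
        rw [hA, if_pos (hiff.mpr hall)]
      · push Not at hall
        obtain ⟨s, hs1, hs2, hs3⟩ := hall
        have hA := pvLoopA_bad di dj N M i j n valide hinb n.toNat 0 le_rfl (by omega)
          ⟨s, by omega, hs2, by simpa using hs3⟩
        simp only [mul_zero, add_zero] at hA
        rw [hA, if_neg (by
          intro hc
          exact hs3 (hiff.mp hc s hs1 hs2))]
    · rw [if_pos hb]
      by_cases hb1 : (0 ≤ i + di ∧ i + di ≤ N ∧ 0 ≤ j + dj ∧ j + dj ≤ M)
      · apply pvLoopA_oob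
        refine ⟨n, by omega, by omega, ?_⟩
        tauto
      · apply pvLoopA_oob
        refine ⟨1, le_rfl, by omega, ?_⟩
        simpa using hb1

-- ===== VERDICT (by name: the statement is the Claim_ definition above) =====
theorem peut_bouger_spec : Claim_equal_peut_bouger := by
  intro i j o n N M valide _hdom hpre
  unfold Spec_peut_bouger
  obtain ⟨ho, hpre2⟩ := hpre
  rcases ho with ho | ho | ho | ho <;> subst ho
  · have hd : (pvDEPLA.get? "nord").getD (0, 0) = ((-1 : Int), (0 : Int)) := by rfl
    simp only [peut_bouger, peut_bouger_alt, hd]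
    exact pvMain (-1) 0 (by norm_num) i j n N M valide (by simpa [pvDelta] using hpre2)
  · have hd : (pvDEPLA.get? "sud").getD (0, 0) = ((1 : Int), (0 : Int)) := by rfl
    simp only [peut_bouger, peut_bouger_alt, hd]
    exact pvMain 1 0 (by norm_num) i j n N M valide (by simpa [pvDelta] using hpre2)
  · have hd : (pvDEPLA.get? "est").getD (0, 0) = ((0 : Int), (1 : Int)) := by rfl
    simp only [peut_bouger, peut_bouger_alt, hd]
    exact pvMain 0 1 (by norm_num) i j n N M valide (by simpa [pvDelta] using hpre2)
  · have hd : (pvDEPLA.get? "ouest").getD (0, 0) = ((0 : Int), (-1 : Int)) := by rfl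
    simp only [peut_bouger, peut_bouger_alt, hd]
    exact pvMain 0 (-1) (by norm_num) i j n N M valide (by simpa [pvDelta] using hpre2)
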